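-- pv_equiv track=rewrite | github.com/mkorovkin2/csearch-entrez-base | summer2018/analyze_global_statistics_DEPRICATED.py | cross_reference_parent_child_practical
-- ===== SOURCE A (Python) =====
-- def cross_reference_parent_child_practical(values1, values2):
--     duplicate_occurances = 0
--
--     for c in values2:
--         child_name = c[0]
--         for p in values1:
--             parent_name = p[0]
--             if parent_name == child_name:
--                 duplicate_occurances += 1
--                 break
--
--     return duplicate_occurances, len(values2)
-- ===== SOURCE B (Python) =====
-- def cross_reference_parent_child_practical(values1, values2):
--     counts = {}
--     for c in values2:
--         counts[c[0]] = counts.get(c[0], 0) + 1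
--     parents = {p[0] for p in values1}
--     duplicate_occurances = sum(n for k, n in counts.items() if k in parents)
--     return duplicate_occurances, len(values2)
-- ===== Notes on version B (the rewrite author's own statement) =====
-- stated objective: alternative
-- what changed: Replaces the nested scan (for each values2 row, scan values1 until a matching first element with break) by an aggregate pass: build a frequency dict of values2 first elements and a set of values1 first elements once, then sum the multiplicities of the distinct keys that occur in the set.
-- outside the precondition, e.g. on cross_reference_parent_child_practical([[]], []): A returns (0, 0), B raises IndexError; on cross_reference_parent_child_practical([['a'], []], [['a']]): A returns (1, 1), B raises IndexError
import Mathlib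
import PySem

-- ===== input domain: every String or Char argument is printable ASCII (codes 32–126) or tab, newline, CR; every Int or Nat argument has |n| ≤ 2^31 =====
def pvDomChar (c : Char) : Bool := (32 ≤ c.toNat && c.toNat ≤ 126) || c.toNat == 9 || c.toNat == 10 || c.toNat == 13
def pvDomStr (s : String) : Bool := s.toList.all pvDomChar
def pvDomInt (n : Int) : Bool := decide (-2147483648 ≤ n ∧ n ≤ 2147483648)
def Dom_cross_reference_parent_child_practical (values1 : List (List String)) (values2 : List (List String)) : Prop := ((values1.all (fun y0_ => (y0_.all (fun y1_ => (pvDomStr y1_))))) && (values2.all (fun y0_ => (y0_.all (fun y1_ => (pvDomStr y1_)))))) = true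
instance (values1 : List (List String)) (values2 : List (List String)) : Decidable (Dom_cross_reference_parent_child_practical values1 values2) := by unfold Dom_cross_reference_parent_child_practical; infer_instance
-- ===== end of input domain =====

-- B replaces A's nested scan by one frequency dict of values2 heads plus a set of values1 heads, summed once (alternative decomposition).

-- ===== PORT A =====
-- inner 'for p in values1: if p[0] == child: duplicate_occurances += 1; break' — the break makes it a find-first returning the row's contribution
def crpcInnerA (child : String) : List (List String) → Int
  | [] => 0
  | p :: rest => if PySem.List.pyGetD p 0 "" == child then 1 else crpcInnerA child rest

def cross_reference_parent_child_practical (values1 : List (List String)) (values2 : List (List String)) : Int × Int :=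
  (values2.foldl (fun acc c => acc + crpcInnerA (PySem.List.pyGetD c 0 "") values1) 0,
   (values2.length : Int))

-- ===== PORT B =====
def cross_reference_parent_child_practical_alt (values1 : List (List String)) (values2 : List (List String)) : Int × Int :=
  let counts : PySem.Dict String Int :=
    values2.foldl (fun d c => d.insert (PySem.List.pyGetD c 0 "") (d.getD (PySem.List.pyGetD c 0 "") 0 + 1)) PySem.Dict.empty
  let parents : PySem.Set String := PySem.Set.ofList (values1.map (fun p => PySem.List.pyGetD p 0 ""))
  let dup : Int := counts.items.foldl (fun s kn => if PySem.Set.contains parents kn.1 then s + kn.2 else s) 0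
  (dup, (values2.length : Int))

-- ===== PRECONDITION & SPEC =====
-- Pre_ excludes inputs containing an empty inner list: there Python indexing [0] raises IndexError — A raises on them except when the empty
-- row is never reached (empty values2, or a values1 row after a break), where A still returns but B's full scans naturally raise.
def Pre_cross_reference_parent_child_practical (values1 : List (List String)) (values2 : List (List String)) : Prop :=
  (∀ p ∈ values1, p ≠ []) ∧ (∀ c ∈ values2, c ≠ [])
instance (values1 : List (List String)) (values2 : List (List String)) : Decidable (Pre_cross_reference_parent_child_practical values1 values2) := by unfold Pre_cross_reference_parent_child_practical; infer_instance

def pvWitness_cross_reference_parent_child_practical : List (List String) × List (List String) :=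
  ([["a"], ["b"]], [["a"], ["c"], ["a"]])

def Spec_cross_reference_parent_child_practical (values1 : List (List String)) (values2 : List (List String)) (out : Int × Int) : Prop := out = cross_reference_parent_child_practical_alt values1 values2
instance (values1 : List (List String)) (values2 : List (List String)) (out : Int × Int) : Decidable (Spec_cross_reference_parent_child_practical values1 values2 out) := by unfold Spec_cross_reference_parent_child_practical; infer_instance

-- ===== CLAIM (what is proved, stated in full; the proofs are below) =====
def Claim_equal_cross_reference_parent_child_practical : Prop := ∀ (values1 : List (List String)) (values2 : List (List String)), Dom_cross_reference_parent_child_practical values1 values2 → Pre_cross_reference_parent_child_practical values1 values2 → Spec_cross_reference_parent_child_practical values1 values2 (cross_reference_parent_child_practical values1 values2)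

-- ===== LEMMAS AND PROOFS =====

-- A's inner loop is the indicator of membership of child among values1 heads
lemma crpcInnerA_eq (child : String) (values1 : List (List String)) :
    crpcInnerA child values1
      = if child ∈ values1.map (fun p => PySem.List.pyGetD p 0 "") then 1 else 0 := by
  induction values1 with
  | nil => simp [crpcInnerA]
  | cons p rest ih =>
    simp only [crpcInnerA, ih, List.map_cons, List.mem_cons]
    by_cases h : PySem.List.pyGetD p 0 "" = child
    · simp [h]
    · simp [h, Ne.symm h, beq_iff_eq]

-- folding indicators counts the filtered elements
lemma foldl_indicator {α : Type} (Q : α → Bool) (l : List α) :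
    ∀ acc : Int, l.foldl (fun a c => a + (if Q c then 1 else 0)) acc
      = acc + ((l.filter Q).length : Int) := by
  induction l with
  | nil => intro acc; simp
  | cons x xs ih =>
    intro acc
    by_cases h : Q x
    · simp [List.foldl_cons, h, ih]; ring
    · simp [List.foldl_cons, h, ih]

-- folding B's filtered sum over (key, weight) pairs
lemma foldl_pairs_sum {α : Type} (P : α → Bool) (w : α → Int) (S : List α) :
    ∀ init : Int,
      (S.map (fun k => (k, w k))).foldl (fun s kn => if P kn.1 then s + kn.2 else s) init
        = init + (S.map (fun k => if P k then w k else 0)).sum := by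
  induction S with
  | nil => intro init; simp
  | cons x xs ih =>
    intro init
    by_cases h : P x
    · simp [h, ih]; ring
    · simp [h, ih]

lemma sum_map_ite {α : Type} (P : α → Bool) (w : α → Int) (S : List α) :
    (S.map (fun k => if P k then w k else 0)).sum = ((S.filter P).map w).sum := by
  induction S with
  | nil => simp
  | cons x xs ih =>
    by_cases h : P x <;> simp [h, ih]

-- the PySem first-occurrence dedup is a permutation of Mathlib's dedup
lemma ofList_perm_dedup {α : Type} [DecidableEq α] (l : List α) :
    (PySem.Set.ofList l).Perm l.dedup := by
  refine (List.perm_ext_iff_of_nodup (PySem.Set.nodup_ofList l) l.nodup_dedup).mpr ?_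
  intro a
  simp [PySem.Set.mem_ofList, List.mem_dedup]

lemma sum_map_intCast (s : List Nat) : (s.map (Nat.cast : Nat → Int)).sum = (s.sum : Int) := by
  exact (Nat.cast_list_sum s).symm

-- key counting identity: summing the multiplicities of the distinct keys satisfying P counts the elements satisfying P
lemma sum_counts_eq_countP (P : String → Bool) (l : List String) :
    (((PySem.Set.ofList l).filter P).map (fun k => (l.count k : Int))).sum = (l.countP P : Int) := by
  have hperm : (((PySem.Set.ofList l).filter P).map (fun k => l.count k)).Perm
      ((l.dedup.filter P).map (fun k => l.count k)) :=
    (((ofList_perm_dedup l).filter P).map _)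
  have hnat : (((PySem.Set.ofList l).filter P).map (fun k => l.count k)).sum = l.countP P := by
    rw [hperm.sum_eq]
    exact List.sum_map_count_dedup_filter_eq_countP P l
  have hm : (((PySem.Set.ofList l).filter P).map (fun k => (l.count k : Int)))
      = (((PySem.Set.ofList l).filter P).map (fun k => l.count k)).map (Nat.cast : Nat → Int) := by
    rw [List.map_map]; rfl
  rw [hm, sum_map_intCast, hnat]

-- ===== VERDICT (by name: the statement is the Claim_ definition above) =====
theorem cross_reference_parent_child_practical_spec : Claim_equal_cross_reference_parent_child_practical := by
  intro values1 values2 _ _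
  unfold Spec_cross_reference_parent_child_practical
  unfold cross_reference_parent_child_practical cross_reference_parent_child_practical_alt
  simp only []
  set h1 := values1.map (fun p => PySem.List.pyGetD p 0 "") with hh1
  set h2 := values2.map (fun c => PySem.List.pyGetD c 0 "") with hh2
  -- the membership predicate used by both sides
  set P : String → Bool := fun x => decide (x ∈ h1) with hP
  -- A side
  have hA : values2.foldl (fun acc c => acc + crpcInnerA (PySem.List.pyGetD c 0 "") values1) 0
      = (h2.countP P : Int) := by
    have : (fun (acc : Int) c => acc + crpcInnerA (PySem.List.pyGetD c 0 "") values1)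
        = fun acc c => acc + (if P (PySem.List.pyGetD c 0 "") then 1 else 0) := by
      funext acc c
      rw [crpcInnerA_eq]
      simp [hP, hh1]
    rw [this]
    have := foldl_indicator (fun c => P (PySem.List.pyGetD c 0 "")) values2 0
    rw [this]
    rw [hh2, List.countP_map, List.countP_eq_length_filter]
    simp only [zero_add, Function.comp_def]
  -- B side: the dict loop is a counter of h2
  have hdict : values2.foldl (fun d c => d.insert (PySem.List.pyGetD c 0 "") (d.getD (PySem.List.pyGetD c 0 "") 0 + 1)) PySem.Dict.empty
      = PySem.Dict.counter h2 := by
    have h := PySem.Dict.foldl_insert_getD_add_one_eq_counter h2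
    rw [hh2, List.foldl_map] at h
    exact h
  have hB : (values2.foldl (fun d c => d.insert (PySem.List.pyGetD c 0 "") (d.getD (PySem.List.pyGetD c 0 "") 0 + 1)) PySem.Dict.empty).items.foldl
        (fun s kn => if PySem.Set.contains (PySem.Set.ofList h1) kn.1 then s + kn.2 else s) 0
      = (h2.countP P : Int) := by
    rw [hdict, PySem.Dict.items_counter]
    have hcont : ∀ k : String, PySem.Set.contains (PySem.Set.ofList h1) k = P k := by
      intro k
      simp [hP, PySem.Set.contains_eq_listContains, PySem.Set.mem_ofList]
    have := foldl_pairs_sum P (fun k => (h2.count k : Int)) (PySem.Set.ofList h2) 0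
    calc ((PySem.Set.ofList h2).map (fun k => (k, (h2.count k : Int)))).foldl
          (fun s kn => if PySem.Set.contains (PySem.Set.ofList h1) kn.1 then s + kn.2 else s) 0
        = ((PySem.Set.ofList h2).map (fun k => (k, (h2.count k : Int)))).foldl
          (fun s kn => if P kn.1 then s + kn.2 else s) 0 := by
          congr 1
          funext s kn
          rw [hcont]
      _ = ((PySem.Set.ofList h2).map (fun k => if P k then (h2.count k : Int) else 0)).sum := by
          rw [this]; ring
      _ = (h2.countP P : Int) := by
          rw [sum_map_ite, sum_counts_eq_countP]
  simp only [hA, hB]
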